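-- pv_equiv track=rewrite | github.com/ParticipaPY/politic-bots | bot_detector.py | __computations_num_intrctns
-- ===== SOURCE A (Python) =====
-- def __computations_num_intrctns(user_screen_name
--     , NO_USERS, interactions):
--     """
--     Compute values related to the no. interactions of a user.
--
--     The values to be computed are:
--         - The total number of users
--         that the user 'user_screen_name'
--         started an interaction with
--         (Not counting interactions with him/herself).
--         - The total number of interactions started by a user.
--         - The number of interactions
--         with the NO_USERS most interacted users.
--     """
--     interacted_users_count = 0
--     total_interactions = 0
--     total_top_interactions = 0
--     for interaction_with, interaction_count in interactions:
--         # We only care about top NO_USERS users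
--         # different from the analyzed user for these accumulators
--         if (interacted_users_count < NO_USERS
--                 and interaction_with != user_screen_name):
--             interacted_users_count += 1
--             total_top_interactions += interaction_count
--         # Accumulate no. interactions with all users
--         total_interactions += interaction_count
--     return interacted_users_count, total_interactions, total_top_interactions
-- ===== SOURCE B (Python) =====
-- def __computations_num_intrctns(user_screen_name, NO_USERS, interactions):
--     # Divide and conquer: a segment's stats are computed from its two halves,
--     # threading the remaining top-user budget from the left half into the right.
--     def go(k, seg):
--         if len(seg) == 0:
--             return (0, 0, 0)
--         if len(seg) == 1:
--             w, c = seg[0]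
--             if w != user_screen_name and k > 0:
--                 return (1, c, c)
--             return (0, c, 0)
--         mid = len(seg) // 2
--         a1, t1, s1 = go(k, seg[:mid])
--         a2, t2, s2 = go(k - a1, seg[mid:])
--         return (a1 + a2, t1 + t2, s1 + s2)
--     return go(NO_USERS, list(interactions))
-- ===== Notes on version B (the rewrite author's own statement) =====
-- stated objective: alternative
-- what changed: Replaces A's single stateful left-to-right loop with three accumulators by a recursive divide-and-conquer: each segment is split in half, the halves' triples are computed recursively (the remaining top-user budget from the left half is passed to the right) and summed component-wise.
import Mathlib
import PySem

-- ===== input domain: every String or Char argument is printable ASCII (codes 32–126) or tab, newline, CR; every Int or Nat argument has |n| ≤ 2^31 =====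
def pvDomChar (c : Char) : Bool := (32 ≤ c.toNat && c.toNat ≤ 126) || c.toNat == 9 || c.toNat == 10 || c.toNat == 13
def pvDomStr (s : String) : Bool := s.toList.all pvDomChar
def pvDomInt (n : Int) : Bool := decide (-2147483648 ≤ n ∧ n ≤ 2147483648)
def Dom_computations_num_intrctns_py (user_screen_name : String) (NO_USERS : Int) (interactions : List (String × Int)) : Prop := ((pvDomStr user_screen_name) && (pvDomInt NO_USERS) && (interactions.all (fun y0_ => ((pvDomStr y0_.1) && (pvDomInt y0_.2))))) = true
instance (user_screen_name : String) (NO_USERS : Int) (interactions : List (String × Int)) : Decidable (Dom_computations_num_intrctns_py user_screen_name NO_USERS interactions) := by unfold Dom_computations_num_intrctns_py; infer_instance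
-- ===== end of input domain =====

-- B replaces A's single stateful left-to-right loop (three accumulators, a guarded
-- branch) by a divide-and-conquer recursion: a segment's triple is obtained by
-- splitting it in half, recursing (the left half's remaining top-user budget is
-- passed to the right half) and summing component-wise. Objective: alternative.

-- ===== PORT A =====
-- one pass, state (interacted_users_count, total_interactions, total_top_interactions)
def computations_num_intrctns_py (user_screen_name : String) (NO_USERS : Int) (interactions : List (String × Int)) : Int × Int × Int :=
  interactions.foldl
    (fun (st : Int × Int × Int) iw =>
      if st.1 < NO_USERS ∧ iw.1 ≠ user_screen_name then
        (st.1 + 1, st.2.1 + iw.2, st.2.2 + iw.2)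
      else
        (st.1, st.2.1 + iw.2, st.2.2))
    (0, 0, 0)

-- ===== PORT B =====
-- Source B's inner 'go': divide and conquer on the segment, budget k threaded left-to-right
def pvGo (u : String) (k : Int) (seg : List (String × Int)) : Int × Int × Int :=
  match seg with
  | [] => (0, 0, 0)
  | [(w, c)] => if w ≠ u ∧ 0 < k then (1, c, c) else (0, c, 0)
  | a :: b :: rest =>
    let mid := (a :: b :: rest).length / 2
    let r1 := pvGo u k ((a :: b :: rest).take mid)
    let r2 := pvGo u (k - r1.1) ((a :: b :: rest).drop mid)
    (r1.1 + r2.1, r1.2.1 + r2.2.1, r1.2.2 + r2.2.2)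
termination_by seg.length
decreasing_by
  · simp [List.length_take]; omega
  · simp [List.length_drop]; omega

def computations_num_intrctns_py_alt (user_screen_name : String) (NO_USERS : Int) (interactions : List (String × Int)) : Int × Int × Int :=
  pvGo user_screen_name NO_USERS interactions

-- ===== PRECONDITION & SPEC =====
def Spec_computations_num_intrctns_py (user_screen_name : String) (NO_USERS : Int) (interactions : List (String × Int)) (out : Int × Int × Int) : Prop := out = computations_num_intrctns_py_alt user_screen_name NO_USERS interactions
instance (user_screen_name : String) (NO_USERS : Int) (interactions : List (String × Int)) (out : Int × Int × Int) : Decidable (Spec_computations_num_intrctns_py user_screen_name NO_USERS interactions out) := by unfold Spec_computations_num_intrctns_py; infer_instance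

-- ===== CLAIM (what is proved, stated in full; the proofs are below) =====
def Claim_equal_computations_num_intrctns_py : Prop := ∀ (user_screen_name : String) (NO_USERS : Int) (interactions : List (String × Int)), Dom_computations_num_intrctns_py user_screen_name NO_USERS interactions → Spec_computations_num_intrctns_py user_screen_name NO_USERS interactions (computations_num_intrctns_py user_screen_name NO_USERS interactions)

-- ===== LEMMAS AND PROOFS =====

-- A's fold step, abbreviated for the lemmas below
def pvStep (u : String) (N : Int) : (Int × Int × Int) → (String × Int) → Int × Int × Int :=
  fun st iw =>
    if st.1 < N ∧ iw.1 ≠ u then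
      (st.1 + 1, st.2.1 + iw.2, st.2.2 + iw.2)
    else
      (st.1, st.2.1 + iw.2, st.2.2)

-- Relocation invariant of A's fold: running it with bound N from count cnt equals
-- running it with bound N - cnt from count 0, shifted back.
theorem foldA_shift (u : String) (xs : List (String × Int)) :
    ∀ (N cnt tot top : Int),
      xs.foldl (pvStep u N) (cnt, tot, top)
      = (let r := xs.foldl (pvStep u (N - cnt)) (0, 0, 0)
         (cnt + r.1, tot + r.2.1, top + r.2.2)) := by
  induction xs with
  | nil => intro N cnt tot top; simp
  | cons hd tl ih =>
    intro N cnt tot top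
    simp only [List.foldl_cons, pvStep]
    by_cases hg : cnt < N ∧ hd.1 ≠ u
    · rw [if_pos hg, if_pos ⟨by omega, hg.2⟩]
      simp only [zero_add]
      rw [ih N (cnt + 1), ih (N - cnt) 1]
      have hNN : N - (cnt + 1) = N - cnt - 1 := by ring
      simp only [hNN, Prod.ext_iff]
      refine ⟨by ring, by ring, by ring⟩
    · have hg' : ¬ ((0 : Int) < N - cnt ∧ hd.1 ≠ u) := by
        intro h; exact hg ⟨by omega, h.2⟩
      rw [if_neg hg, if_neg hg']
      simp only [zero_add]
      rw [ih N cnt]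
      conv_rhs => rw [ih (N - cnt) 0 hd.2 0]
      simp only [Int.sub_zero, Prod.ext_iff]
      refine ⟨by ring, by ring, by ring⟩

-- A's fold splits over append, passing the left part's remaining budget right.
theorem foldA_append (u : String) (N : Int) (xs ys : List (String × Int)) :
    (xs ++ ys).foldl (pvStep u N) (0, 0, 0)
    = (let r1 := xs.foldl (pvStep u N) (0, 0, 0)
       let r2 := ys.foldl (pvStep u (N - r1.1)) (0, 0, 0)
       (r1.1 + r2.1, r1.2.1 + r2.2.1, r1.2.2 + r2.2.2)) := by
  rw [List.foldl_append]
  have h := foldA_shift u ys N (xs.foldl (pvStep u N) (0,0,0)).1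
            (xs.foldl (pvStep u N) (0,0,0)).2.1 (xs.foldl (pvStep u N) (0,0,0)).2.2
  simpa using h

-- B's divide-and-conquer computes exactly A's fold result.
theorem pvGo_eq_foldA (u : String) : ∀ (seg : List (String × Int)) (k : Int),
    pvGo u k seg = seg.foldl (pvStep u k) (0, 0, 0) := by
  intro seg
  induction hn : seg.length using Nat.strong_induction_on generalizing seg with
  | _ n ih =>
    intro k
    match seg with
    | [] => simp [pvGo]
    | [(w, c)] =>
      simp only [pvGo, List.foldl_cons, List.foldl_nil, pvStep]
      by_cases h : w ≠ u ∧ 0 < k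
      · rw [if_pos h, if_pos ⟨by omega, h.1⟩]; norm_num
      · rw [if_neg h, if_neg (by intro hh; exact h ⟨hh.2, by omega⟩)]; norm_num
    | a :: b :: rest =>
      simp only [pvGo]
      have hL : (a :: b :: rest).length = rest.length + 2 := by simp
      have hn' : rest.length + 2 = n := by rw [← hL]; exact hn
      have htake : ((a :: b :: rest).take ((a :: b :: rest).length / 2)).length < n := by
        rw [List.length_take, hL]; omega
      have hdrop : ((a :: b :: rest).drop ((a :: b :: rest).length / 2)).length < n := by
        rw [List.length_drop, hL]; omega
      rw [ih _ htake _ rfl, ih _ hdrop _ rfl]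
      have hsplit : (a :: b :: rest) = (a :: b :: rest).take ((a :: b :: rest).length / 2)
          ++ (a :: b :: rest).drop ((a :: b :: rest).length / 2) := (List.take_append_drop _ _).symm
      conv_rhs => rw [hsplit]
      rw [foldA_append]

-- ===== VERDICT (by name: the statement is the Claim_ definition above) =====
theorem computations_num_intrctns_py_spec : Claim_equal_computations_num_intrctns_py := by
  intro u N xs _
  show computations_num_intrctns_py u N xs = computations_num_intrctns_py_alt u N xs
  unfold computations_num_intrctns_py computations_num_intrctns_py_alt
  rw [pvGo_eq_foldA]
  rfl
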